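-- pv_equiv track=rewrite | github.com/yeemio/owl-github-intel | scripts/analyze_user_stack.py | pick_related
-- ===== SOURCE A (Python) =====
-- def pick_related(master: dict[str, dict[str, str]], lanes: set[str], exclude: set[str]) -> dict[str, list[str]]:
--     # Recommend P0/P1 items by lane that are not already in the user's inventory.
--     out: dict[str, list[str]] = {}
--     for lane in sorted(lanes):
--         cands = []
--         for slug, row in master.items():
--             if slug in exclude:
--                 continue
--             if (row.get("topic") or "").strip().lower() != lane:
--                 continue
--             pr = (row.get("adoption_priority") or "").strip().upper()
--             verdict = (row.get("decision_verdict") or "").strip().lower()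
--             if pr in {"P0", "P1"} and verdict in {"survives", "partial"}:
--                 cands.append((pr, slug))
--         cands.sort(key=lambda x: (x[0], x[1]))
--         out[lane] = [slug for _, slug in cands[:6]]
--     return out
-- ===== SOURCE B (Python) =====
-- def pick_related(master: dict[str, dict[str, str]], lanes: set[str], exclude: set[str]) -> dict[str, list[str]]:
--     # One pass over master bucketing qualifying rows by normalized topic,
--     # then per lane: sort its (small) bucket and keep the first 6 slugs.
--     buckets: dict[str, list[tuple[str, str]]] = {}
--     for slug, row in master.items():
--         if slug in exclude:
--             continue
--         pr = (row.get("adoption_priority") or "").strip().upper()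
--         if pr not in {"P0", "P1"}:
--             continue
--         verdict = (row.get("decision_verdict") or "").strip().lower()
--         if verdict not in {"survives", "partial"}:
--             continue
--         topic = (row.get("topic") or "").strip().lower()
--         buckets.setdefault(topic, []).append((pr, slug))
--     out: dict[str, list[str]] = {}
--     for lane in sorted(lanes):
--         cands = sorted(buckets.get(lane, []))
--         out[lane] = [slug for _, slug in cands[:6]]
--     return out
-- ===== Notes on version B (the rewrite author's own statement) =====
-- stated objective: faster
-- what changed: Instead of rescanning all of master for every lane, B makes one pass over master bucketing qualifying (priority, slug) pairs by normalized topic into a dict, then sorts and truncates only each lane's bucket.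
import Mathlib
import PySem

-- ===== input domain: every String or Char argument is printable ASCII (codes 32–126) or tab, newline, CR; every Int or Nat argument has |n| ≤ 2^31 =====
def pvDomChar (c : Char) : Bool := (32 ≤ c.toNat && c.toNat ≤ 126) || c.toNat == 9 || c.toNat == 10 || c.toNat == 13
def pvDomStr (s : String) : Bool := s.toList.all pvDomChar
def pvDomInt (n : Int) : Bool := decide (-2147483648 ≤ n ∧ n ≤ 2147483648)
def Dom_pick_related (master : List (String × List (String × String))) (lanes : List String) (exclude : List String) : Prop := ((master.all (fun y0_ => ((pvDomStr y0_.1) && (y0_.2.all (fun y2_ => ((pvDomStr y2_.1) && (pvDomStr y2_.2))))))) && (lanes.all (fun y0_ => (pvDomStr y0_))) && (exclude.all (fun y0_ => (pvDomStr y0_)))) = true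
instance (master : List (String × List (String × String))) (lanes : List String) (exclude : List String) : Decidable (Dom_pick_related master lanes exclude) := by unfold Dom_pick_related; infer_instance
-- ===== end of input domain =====

-- B replaces A's per-lane rescans of master by one bucketing pass over master (a dict keyed by
-- normalized topic), then sorts and truncates only each lane's own bucket: an asymptotic speed-up.

-- ===== PORT A =====
def pick_related (master : List (String × List (String × String))) (lanes : List String) (exclude : List String) : List (String × List String) :=
  (PySem.List.sorted (PySem.Set.ofList lanes) (fun x => x) false).foldl (fun out lane =>
    let cands := master.foldl (fun cands p =>
      if p.1 ∈ exclude then cands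
      else if PySem.Str.lower (PySem.Str.strip ((PySem.Dict.mk p.2).getD "topic" "")) ≠ lane then cands
      else
        let pr := PySem.Str.upper (PySem.Str.strip ((PySem.Dict.mk p.2).getD "adoption_priority" ""))
        let verdict := PySem.Str.lower (PySem.Str.strip ((PySem.Dict.mk p.2).getD "decision_verdict" ""))
        if (pr = "P0" ∨ pr = "P1") ∧ (verdict = "survives" ∨ verdict = "partial") then cands ++ [(pr, p.1)]
        else cands) ([] : List (String × String))
    let cs := PySem.List.sorted2 cands (fun x => x.1) (fun x => x.2) false
    out ++ [(lane, (PySem.List.slice cs none (some 6)).map (fun x => x.2))]) []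

-- ===== PORT B =====
def pick_related_alt (master : List (String × List (String × String))) (lanes : List String) (exclude : List String) : List (String × List String) :=
  let buckets := master.foldl (fun d p =>
    if p.1 ∈ exclude then d
    else
      let pr := PySem.Str.upper (PySem.Str.strip ((PySem.Dict.mk p.2).getD "adoption_priority" ""))
      if ¬(pr = "P0" ∨ pr = "P1") then d
      else
        let verdict := PySem.Str.lower (PySem.Str.strip ((PySem.Dict.mk p.2).getD "decision_verdict" ""))
        if ¬(verdict = "survives" ∨ verdict = "partial") then d
        else
          let topic := PySem.Str.lower (PySem.Str.strip ((PySem.Dict.mk p.2).getD "topic" ""))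
          d.modify topic [] (fun l => l ++ [(pr, p.1)])) (PySem.Dict.empty : PySem.Dict String (List (String × String)))
  (PySem.List.sorted (PySem.Set.ofList lanes) (fun x => x) false).foldl (fun out lane =>
    let cands := PySem.List.sorted2 (buckets.getD lane []) (fun x => x.1) (fun x => x.2) false
    out ++ [(lane, (PySem.List.slice cands none (some 6)).map (fun x => x.2))]) []

-- ===== PRECONDITION & SPEC =====
def Spec_pick_related (master : List (String × List (String × String))) (lanes : List String) (exclude : List String) (out : List (String × List String)) : Prop := out = pick_related_alt master lanes exclude
instance (master : List (String × List (String × String))) (lanes : List String) (exclude : List String) (out : List (String × List String)) : Decidable (Spec_pick_related master lanes exclude out) := by unfold Spec_pick_related; infer_instance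

-- ===== CLAIM (what is proved, stated in full; the proofs are below) =====
def Claim_equal_pick_related : Prop := ∀ (master : List (String × List (String × String))) (lanes : List String) (exclude : List String), Dom_pick_related master lanes exclude → Spec_pick_related master lanes exclude (pick_related master lanes exclude)

-- ===== LEMMAS AND PROOFS =====

-- abbreviations for the normalized fields (proof-side only)
def pvTopic (p : String × List (String × String)) : String :=
  PySem.Str.lower (PySem.Str.strip ((PySem.Dict.mk p.2).getD "topic" ""))
def pvPr (p : String × List (String × String)) : String :=
  PySem.Str.upper (PySem.Str.strip ((PySem.Dict.mk p.2).getD "adoption_priority" ""))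
def pvVerdict (p : String × List (String × String)) : String :=
  PySem.Str.lower (PySem.Str.strip ((PySem.Dict.mk p.2).getD "decision_verdict" ""))
def pvOk (exclude : List String) (p : String × List (String × String)) : Bool :=
  !(exclude.contains p.1) && (pvPr p == "P0" || pvPr p == "P1") && (pvVerdict p == "survives" || pvVerdict p == "partial")

-- A's inner loop over master, for one lane, is a filter+map of master
theorem pvCandsA (master : List (String × List (String × String))) (exclude : List String) (lane : String) :
    master.foldl (fun cands p =>
      if p.1 ∈ exclude then cands
      else if PySem.Str.lower (PySem.Str.strip ((PySem.Dict.mk p.2).getD "topic" "")) ≠ lane then cands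
      else
        let pr := PySem.Str.upper (PySem.Str.strip ((PySem.Dict.mk p.2).getD "adoption_priority" ""))
        let verdict := PySem.Str.lower (PySem.Str.strip ((PySem.Dict.mk p.2).getD "decision_verdict" ""))
        if (pr = "P0" ∨ pr = "P1") ∧ (verdict = "survives" ∨ verdict = "partial") then cands ++ [(pr, p.1)]
        else cands) ([] : List (String × String))
    = (master.filter (fun p => (pvOk exclude p && (pvTopic p == lane)))).map (fun p => (pvPr p, p.1)) := by
  rw [PySem.List.foldl_congr_mem
      (g := fun cands p => if pvOk exclude p && (pvTopic p == lane) then cands ++ [(pvPr p, p.1)] else cands)]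
  · rw [PySem.List.foldl_append_if]
    simp
  · intro acc p _
    simp only [pvOk, pvTopic, pvPr, pvVerdict]
    split_ifs with h1 h2 h3 h4 <;> simp_all

-- B's bucket for one lane is the same filter+map of master
theorem pvCandsB (master : List (String × List (String × String))) (exclude : List String) (lane : String) :
    (master.foldl (fun d p =>
      if p.1 ∈ exclude then d
      else
        let pr := PySem.Str.upper (PySem.Str.strip ((PySem.Dict.mk p.2).getD "adoption_priority" ""))
        if ¬(pr = "P0" ∨ pr = "P1") then d
        else
          let verdict := PySem.Str.lower (PySem.Str.strip ((PySem.Dict.mk p.2).getD "decision_verdict" ""))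
          if ¬(verdict = "survives" ∨ verdict = "partial") then d
          else
            let topic := PySem.Str.lower (PySem.Str.strip ((PySem.Dict.mk p.2).getD "topic" ""))
            d.modify topic [] (fun l => l ++ [(pr, p.1)])) (PySem.Dict.empty : PySem.Dict String (List (String × String)))).getD lane []
    = (master.filter (fun p => (pvOk exclude p && (pvTopic p == lane)))).map (fun p => (pvPr p, p.1)) := by
  rw [PySem.List.foldl_congr_mem
      (g := fun d p => if pvOk exclude p then d.modify (pvTopic p) [] (fun l => l ++ [(pvPr p, p.1)]) else d)]
  · rw [PySem.List.foldl_if_eq_foldl_filter]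
    have hm := List.foldl_map (f := fun p : String × List (String × String) => (pvTopic p, (pvPr p, p.1)))
      (g := fun (d : PySem.Dict String (List (String × String))) q => d.modify q.1 [] (fun l => l ++ [q.2]))
      (l := List.filter (pvOk exclude) master) (init := PySem.Dict.empty)
    rw [show (List.filter (pvOk exclude) master).foldl
        (fun (d : PySem.Dict String (List (String × String))) p =>
          d.modify (pvTopic p) [] (fun l => l ++ [(pvPr p, p.1)])) PySem.Dict.empty
      = ((List.filter (pvOk exclude) master).map
          (fun p => (pvTopic p, (pvPr p, p.1)))).foldl
          (fun (d : PySem.Dict String (List (String × String))) q => d.modify q.1 [] (fun l => l ++ [q.2]))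
          PySem.Dict.empty from hm.symm]
    rw [PySem.Dict.getD_foldl_modify_append]
    rw [List.filter_map, List.filter_filter, List.map_map]
    apply congrArg (List.map _)
    apply List.filter_congr
    intro p _
    simp only [Function.comp]
    exact Bool.and_comm ..
  · intro d p _
    simp only [pvOk, pvTopic, pvPr, pvVerdict]
    split_ifs with h1 h2 h3 h4 <;> simp_all

-- ===== VERDICT (by name: the statement is the Claim_ definition above) =====
theorem pick_related_spec : Claim_equal_pick_related := by
  intro master lanes exclude _
  unfold Spec_pick_related pick_related pick_related_alt
  simp only []
  rw [PySem.List.foldl_append_singleton_eq_map, PySem.List.foldl_append_singleton_eq_map]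
  simp only [List.nil_append]
  apply List.map_congr_left
  intro lane _
  rw [pvCandsA, pvCandsB]
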